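-- pv_equiv track=rewrite | github.com/ronaldgustaf/apriori-market_basket | 1_reversed_hash_table.py | count_hash_table
-- ===== SOURCE A (Python) =====
-- def count_hash_table(C, hash_table):
--     C_count = {itemset: 0 for itemset in C}
--     # iterate over each itemset in C and count its occurrences in the transactions
--     for itemset in C:
--         # find the indices of the transactions that contain all items in the itemset
--         indices = None
--         for item in itemset:
--             item_indices = hash_table[item]
--             if indices is None:
--                 indices = item_indices
--             else:
--                 indices = indices.intersection(item_indices)
--             if not indices:
--                 break
--         # count the number of transactions that contain all items in the itemset
--         C_count[itemset] = len(indices)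
--
--     return C_count
-- ===== SOURCE B (Python) =====
-- def count_hash_table(C, hash_table):
--     # Tally, per candidate itemset, how often each transaction index is hit by
--     # the itemset's posting sets; the support is the number of indices hit
--     # len(itemset) times (i.e. by every item).
--     C_count = {}
--     for itemset in C:
--         counts = {}
--         for item in itemset:
--             for idx in hash_table[item]:
--                 counts[idx] = counts.get(idx, 0) + 1
--         k = len(itemset)
--         C_count[itemset] = sum(1 for v in counts.values() if v == k)
--     return C_count
-- ===== Notes on version B (the rewrite author's own statement) =====
-- stated objective: alternative
-- what changed: Replaces the posting-list set-intersection chain with early exit by a single tally pass: a counter over all posting sets per itemset, with support = number of indices whose tally equals len(itemset).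
-- outside the precondition, e.g. on count_hash_table([(0, 1)], {0: set()}): A returns {(0, 1): 0}, B raises KeyError
import Mathlib
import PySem

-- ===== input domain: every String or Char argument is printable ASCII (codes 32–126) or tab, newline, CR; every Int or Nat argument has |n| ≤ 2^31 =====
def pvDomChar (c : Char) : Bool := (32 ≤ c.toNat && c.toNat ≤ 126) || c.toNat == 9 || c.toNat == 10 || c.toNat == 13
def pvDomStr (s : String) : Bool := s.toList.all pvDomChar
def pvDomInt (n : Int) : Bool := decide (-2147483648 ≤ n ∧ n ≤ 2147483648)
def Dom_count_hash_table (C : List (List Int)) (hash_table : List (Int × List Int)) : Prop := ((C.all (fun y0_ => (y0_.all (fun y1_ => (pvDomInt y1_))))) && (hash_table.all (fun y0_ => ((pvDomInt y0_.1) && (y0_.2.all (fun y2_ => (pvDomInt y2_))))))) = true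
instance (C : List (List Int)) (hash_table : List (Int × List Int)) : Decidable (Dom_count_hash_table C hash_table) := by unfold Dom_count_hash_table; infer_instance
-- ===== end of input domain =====

-- B replaces A's posting-set intersection chain (with early exit) by a tally pass: count, per
-- transaction index, how many of the itemset's posting sets contain it, and take the indices
-- counted len(itemset) times (objective: alternative; same cost).

-- ===== PORT A =====
-- inner 'for item in itemset' loop of A: running intersection with early break on empty
def pvALoop (ht : PySem.Dict Int (List Int)) : List Int → Option (List Int) → Option (List Int)
  | [], indices => indices
  | item :: rest, indices =>
    let item_indices := PySem.Dict.getD ht item []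
    let indices' : List Int :=
      match indices with
      | none => item_indices
      | some s => PySem.Set.inter s item_indices
    if indices' = [] then some indices' else pvALoop ht rest (some indices')

def count_hash_table (C : List (List Int)) (hash_table : List (Int × List Int)) : List (List Int × Int) :=
  let ht : PySem.Dict Int (List Int) := ⟨hash_table⟩
  -- C_count = {itemset: 0 for itemset in C}
  let C_count : PySem.Dict (List Int) Int := C.foldl (fun d itemset => d.insert itemset 0) PySem.Dict.empty
  -- for itemset in C: … C_count[itemset] = len(indices)   (len(None) raises outside Pre_; getD [] there)
  let C_count := C.foldl
    (fun d itemset => d.insert itemset (((pvALoop ht itemset none).getD []).length : Int)) C_count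
  C_count.items

-- ===== PORT B =====
-- per-itemset body of B: tally each index over the itemset's posting sets, support = #indices with full tally
def pvBSupport (ht : PySem.Dict Int (List Int)) (itemset : List Int) : Int :=
  let counts : PySem.Dict Int Int := itemset.foldl
    (fun c item => (PySem.Dict.getD ht item []).foldl
      (fun c idx => c.insert idx (PySem.Dict.getD c idx 0 + 1)) c) PySem.Dict.empty
  let k : Int := (itemset.length : Int)
  counts.values.foldl (fun acc v => if v = k then acc + 1 else acc) 0

def count_hash_table_alt (C : List (List Int)) (hash_table : List (Int × List Int)) : List (List Int × Int) :=
  let ht : PySem.Dict Int (List Int) := ⟨hash_table⟩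
  (C.foldl (fun d itemset => d.insert itemset (pvBSupport ht itemset)) (PySem.Dict.empty : PySem.Dict (List Int) Int)).items

-- ===== PRECONDITION & SPEC =====
-- Nodup of the dict keys and of each posting list only rules out association lists that encode no
-- Python dict-of-sets; besides the inputs where A raises (KeyError / TypeError on an empty itemset),
-- Pre_ also excludes C where an item missing from hash_table occurs after the running intersection
-- already became empty: A's break returns 0 there while B raises KeyError.
def Pre_count_hash_table (C : List (List Int)) (hash_table : List (Int × List Int)) : Prop :=
  (hash_table.map Prod.fst).Nodup ∧
  (∀ p ∈ hash_table, p.2.Nodup) ∧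
  (∀ itemset ∈ C, itemset ≠ [] ∧ ∀ item ∈ itemset, item ∈ hash_table.map Prod.fst)
instance (C : List (List Int)) (hash_table : List (Int × List Int)) : Decidable (Pre_count_hash_table C hash_table) := by unfold Pre_count_hash_table; infer_instance
def pvWitness_count_hash_table : List (List Int) × (List (Int × List Int)) :=
  ([[0], [0, 1]], [(0, [0, 2]), (1, [2, 3])])

def Spec_count_hash_table (C : List (List Int)) (hash_table : List (Int × List Int)) (out : List (List Int × Int)) : Prop := out = count_hash_table_alt C hash_table
instance (C : List (List Int)) (hash_table : List (Int × List Int)) (out : List (List Int × Int)) : Decidable (Spec_count_hash_table C hash_table out) := by unfold Spec_count_hash_table; infer_instance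

-- ===== CLAIM (what is proved, stated in full; the proofs are below) =====
def Claim_equal_count_hash_table : Prop := ∀ (C : List (List Int)) (hash_table : List (Int × List Int)), Dom_count_hash_table C hash_table → Pre_count_hash_table C hash_table → Spec_count_hash_table C hash_table (count_hash_table C hash_table)

-- ===== LEMMAS AND PROOFS =====

-- the posting set of an item
def pvPost (hash_table : List (Int × List Int)) (item : Int) : List Int :=
  PySem.Dict.getD ⟨hash_table⟩ item []

-- folding intersections from the empty set stays empty
theorem pv_foldl_inter_nil (l : List Int) (g : Int → List Int) :
    l.foldl (fun s i => PySem.Set.inter s (g i)) [] = [] := by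
  induction l with
  | nil => rfl
  | cons x xs ih => simpa [PySem.Set.inter] using ih

-- A's early-exit loop computes the plain intersection fold
theorem pv_aLoop_some (ht : List (Int × List Int)) (rest : List Int) (s : List Int) :
    pvALoop ⟨ht⟩ rest (some s) =
      some (rest.foldl (fun s i => PySem.Set.inter s (pvPost ht i)) s) := by
  induction rest generalizing s with
  | nil => rfl
  | cons item rest ih =>
    simp only [pvALoop, List.foldl_cons, pvPost]
    by_cases hT : PySem.Set.inter s (PySem.Dict.getD ⟨ht⟩ item []) = []
    · simp [hT, pv_foldl_inter_nil]
    · simp [hT, ih, pvPost]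

theorem pv_aVal_eq (ht : List (Int × List Int)) (i0 : Int) (rest : List Int) :
    ((pvALoop ⟨ht⟩ (i0 :: rest) none).getD []).length =
      (rest.foldl (fun s i => PySem.Set.inter s (pvPost ht i)) (pvPost ht i0)).length := by
  simp only [pvALoop, pvPost]
  by_cases h0 : PySem.Dict.getD (⟨ht⟩ : PySem.Dict Int (List Int)) i0 [] = []
  · simp [h0, pv_foldl_inter_nil]
  · simp [h0, pv_aLoop_some, pvPost]

theorem pv_mem_interFold (ht : List (Int × List Int)) (rest : List Int) (s : List Int) (x : Int) :
    x ∈ rest.foldl (fun s i => PySem.Set.inter s (pvPost ht i)) s ↔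
      x ∈ s ∧ ∀ i ∈ rest, x ∈ pvPost ht i := by
  induction rest generalizing s with
  | nil => simp
  | cons i rest ih =>
    simp only [List.foldl_cons, ih, PySem.Set.mem_inter, List.forall_mem_cons]
    tauto

theorem pv_nodup_interFold (ht : List (Int × List Int)) (rest : List Int) (s : List Int)
    (hs : s.Nodup) : (rest.foldl (fun s i => PySem.Set.inter s (pvPost ht i)) s).Nodup := by
  induction rest generalizing s with
  | nil => exact hs
  | cons i rest ih => exact ih _ (PySem.Set.nodup_inter _ _ hs)

-- a getD value out of a literal dict is the default or one of the stored values
theorem pv_getD_mk (ht : List (Int × List Int)) (k : Int) :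
    pvPost ht k = [] ∨ ∃ p ∈ ht, pvPost ht k = p.2 := by
  induction ht with
  | nil => left; rfl
  | cons p rest ih =>
    obtain ⟨k1, v1⟩ := p
    by_cases h : k1 == k
    · right
      refine ⟨(k1, v1), List.mem_cons_self, ?_⟩
      simp [pvPost, PySem.Dict.getD_eq_get?_getD, PySem.Dict.get?_mk_cons, h]
    · rcases ih with h0 | ⟨q, hq, hv⟩
      · left
        simpa [pvPost, PySem.Dict.getD_eq_get?_getD, PySem.Dict.get?_mk_cons, h] using h0
      · right
        refine ⟨q, List.mem_cons_of_mem _ hq, ?_⟩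
        simpa [pvPost, PySem.Dict.getD_eq_get?_getD, PySem.Dict.get?_mk_cons, h] using hv

theorem pv_nodup_post (ht : List (Int × List Int)) (h : ∀ p ∈ ht, p.2.Nodup) (k : Int) :
    (pvPost ht k).Nodup := by
  rcases pv_getD_mk ht k with h0 | ⟨p, hp, hv⟩
  · simp [h0]
  · rw [hv]; exact h p hp

-- B's counter: value at v is the total multiplicity of v over the posting lists
theorem pv_counts_getD (ht : List (Int × List Int)) (it : List Int) (c : PySem.Dict Int Int) (v : Int) :
    (it.foldl (fun c item => (PySem.Dict.getD (⟨ht⟩ : PySem.Dict Int (List Int)) item []).foldl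
        (fun c idx => c.insert idx (PySem.Dict.getD c idx 0 + 1)) c) c).getD v 0
      = c.getD v 0 + (it.map (fun item => ((pvPost ht item).count v : Int))).sum := by
  induction it generalizing c with
  | nil => simp
  | cons item rest ih =>
    simp only [List.foldl_cons, List.map_cons, List.sum_cons]
    rw [ih, PySem.Dict.getD_foldl_insert_add_one]
    simp only [pvPost]
    ring

-- B's counter: its key set is the union of the posting lists
theorem pv_counts_keys_mem (ht : List (Int × List Int)) (it : List Int) (c : PySem.Dict Int Int) (v : Int) :
    (v ∈ (it.foldl (fun c item => (PySem.Dict.getD (⟨ht⟩ : PySem.Dict Int (List Int)) item []).foldl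
        (fun c idx => c.insert idx (PySem.Dict.getD c idx 0 + 1)) c) c).keys) ↔
      v ∈ c.keys ∨ ∃ item ∈ it, v ∈ pvPost ht item := by
  induction it generalizing c with
  | nil => simp
  | cons item rest ih =>
    simp only [List.foldl_cons, ih, PySem.Dict.keys_foldl_insert, PySem.Set.mem_update]
    simp only [pvPost, List.exists_mem_cons_iff]
    tauto

theorem pv_counts_keys_nodup (ht : List (Int × List Int)) (it : List Int) (c : PySem.Dict Int Int)
    (hc : c.keys.Nodup) :
    (it.foldl (fun c item => (PySem.Dict.getD (⟨ht⟩ : PySem.Dict Int (List Int)) item []).foldl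
        (fun c idx => c.insert idx (PySem.Dict.getD c idx 0 + 1)) c) c).keys.Nodup := by
  induction it generalizing c with
  | nil => exact hc
  | cons item rest ih =>
    exact ih _ (PySem.Dict.nodup_keys_foldl_insert _ _ _ hc)

-- per-itemset agreement: A's intersection length = B's tally count
theorem pv_perItem (ht : List (Int × List Int)) (hnd : ∀ p ∈ ht, p.2.Nodup)
    (i0 : Int) (rest : List Int) :
    ((pvALoop (⟨ht⟩ : PySem.Dict Int (List Int)) (i0 :: rest) none).getD []).length
      = pvBSupport ⟨ht⟩ (i0 :: rest) := by
  rw [pv_aVal_eq]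
  simp only [pvBSupport]
  rw [PySem.List.foldl_ite_add_one]
  have hknodup : ((i0 :: rest).foldl (fun c item => (PySem.Dict.getD (⟨ht⟩ : PySem.Dict Int (List Int)) item []).foldl
      (fun c idx => c.insert idx (PySem.Dict.getD c idx 0 + 1)) c) (PySem.Dict.empty : PySem.Dict Int Int)).keys.Nodup :=
    pv_counts_keys_nodup ht _ _ (by simp [PySem.Dict.keys_empty])
  rw [PySem.Dict.values_eq_map_keys _ hknodup 0, List.countP_map]
  have hget : ∀ v, ((i0 :: rest).foldl (fun c item => (PySem.Dict.getD (⟨ht⟩ : PySem.Dict Int (List Int)) item []).foldl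
      (fun c idx => c.insert idx (PySem.Dict.getD c idx 0 + 1)) c) (PySem.Dict.empty : PySem.Dict Int Int)).getD v 0
      = ((i0 :: rest).countP (fun i => decide (v ∈ pvPost ht i)) : Int) := by
    intro v
    rw [pv_counts_getD, PySem.Dict.getD_empty, zero_add]
    rw [List.map_congr_left (f := fun item => ((pvPost ht item).count v : Int))
      (g := fun item => if (decide (v ∈ pvPost ht item)) = true then (1 : Int) else 0) ?_]
    · exact PySem.List.sum_map_ite_one_zero _ _
    · intro item _
      by_cases hm : v ∈ pvPost ht item
      · simp [hm, List.count_eq_one_of_mem (pv_nodup_post ht hnd item) hm]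
      · simp [hm, List.count_eq_zero_of_not_mem hm]
  rw [List.countP_congr (q := fun v => decide (∀ i ∈ (i0 :: rest), v ∈ pvPost ht i)) ?_]
  · rw [List.countP_eq_length_filter]
    have hIn : (rest.foldl (fun s i => PySem.Set.inter s (pvPost ht i)) (pvPost ht i0)).Nodup :=
      pv_nodup_interFold ht rest _ (pv_nodup_post ht hnd i0)
    have hperm : (rest.foldl (fun s i => PySem.Set.inter s (pvPost ht i)) (pvPost ht i0)).Perm
        (List.filter (fun v => decide (∀ i ∈ (i0 :: rest), v ∈ pvPost ht i))
          ((i0 :: rest).foldl (fun c item => (PySem.Dict.getD (⟨ht⟩ : PySem.Dict Int (List Int)) item []).foldl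
            (fun c idx => c.insert idx (PySem.Dict.getD c idx 0 + 1)) c) (PySem.Dict.empty : PySem.Dict Int Int)).keys) := by
      rw [List.perm_ext_iff_of_nodup hIn (hknodup.filter _)]
      intro a
      rw [List.mem_filter, pv_mem_interFold]
      simp only [decide_eq_true_eq, List.forall_mem_cons]
      constructor
      · rintro ⟨h0, hall⟩
        exact ⟨(pv_counts_keys_mem ht _ _ a).mpr (Or.inr ⟨i0, List.mem_cons_self, h0⟩), h0, hall⟩
      · rintro ⟨-, h0, hall⟩
        exact ⟨h0, hall⟩
    rw [hperm.length_eq, zero_add]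
  · intro v _
    simp only [Function.comp_apply, decide_eq_true_eq]
    rw [hget v]
    constructor
    · intro h i hi
      have hlen : (i0 :: rest).countP (fun i => decide (v ∈ pvPost ht i)) = (i0 :: rest).length := by
        exact_mod_cast h
      simpa using List.countP_eq_length.mp hlen i hi
    · intro h
      exact_mod_cast List.countP_eq_length.mpr (fun a ha => by simpa using h a ha)

-- a fold of key-determined inserts over keys already present rewrites values in place
theorem pv_items_foldl_selfmap {κ ν : Type} [DecidableEq κ] [BEq κ] [LawfulBEq κ]
    (l : List κ) (f : κ → ν) (d : PySem.Dict κ ν) (h : ∀ k ∈ l, d.contains k = true) :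
    (l.foldl (fun d k => d.insert k (f k)) d).items
      = d.items.map (fun p => if p.1 ∈ l then (p.1, f p.1) else p) := by
  induction l generalizing d with
  | nil => simp
  | cons x xs ih =>
    have hx := h x List.mem_cons_self
    have hxs : ∀ k ∈ xs, (d.insert x (f x)).contains k = true := by
      intro k hk
      rw [PySem.Dict.contains_insert]
      simp [h k (List.mem_cons_of_mem _ hk)]
    rw [List.foldl_cons, ih _ hxs, PySem.Dict.items_insert_of_contains d (f x) hx, List.map_map]
    refine List.map_congr_left ?_
    intro p _
    by_cases hpx : p.1 = x
    · simp [Function.comp, hpx]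
    · by_cases hmem : p.1 ∈ xs <;> simp [Function.comp, hpx, hmem]

-- a fold of key-determined inserts from the empty dict lists first occurrences with their values
theorem pv_items_foldl_empty {κ ν : Type} [DecidableEq κ] [BEq κ] [LawfulBEq κ]
    (l : List κ) (f : κ → ν) :
    (l.foldl (fun d k => d.insert k (f k)) (PySem.Dict.empty : PySem.Dict κ ν)).items
      = (PySem.Set.ofList l).map (fun k => (k, f k)) := by
  induction l using List.reverseRecOn with
  | nil => rfl
  | append_singleton xs x ih =>
    rw [List.foldl_append, List.foldl_cons, List.foldl_nil, PySem.Set.ofList_append_singleton]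
    by_cases hx : x ∈ xs
    · have hc : (List.foldl (fun d k => d.insert k (f k)) (PySem.Dict.empty : PySem.Dict κ ν) xs).contains x = true := by
        rw [PySem.Dict.contains_iff_mem_keys, PySem.Dict.keys_foldl_insert, PySem.Dict.keys_empty,
          PySem.Set.update_nil_left, PySem.Set.mem_ofList]
        exact hx
      rw [PySem.Dict.items_insert_of_contains _ _ hc, ih, List.map_map,
        PySem.Set.add_of_mem (by rwa [PySem.Set.mem_ofList])]
      refine List.map_congr_left ?_
      intro k _
      by_cases hkx : k = x <;> simp [Function.comp, hkx]
    · have hc : (List.foldl (fun d k => d.insert k (f k)) (PySem.Dict.empty : PySem.Dict κ ν) xs).contains x = false := by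
        rw [Bool.eq_false_iff]
        intro hT
        rw [PySem.Dict.contains_iff_mem_keys, PySem.Dict.keys_foldl_insert, PySem.Dict.keys_empty,
          PySem.Set.update_nil_left, PySem.Set.mem_ofList] at hT
        exact hx hT
      rw [PySem.Dict.items_insert_of_not_contains _ _ hc, ih,
        PySem.Set.add_of_not_mem (fun hmem => hx ((PySem.Set.mem_ofList _ _).mp hmem)), List.map_append]
      simp

-- ===== VERDICT (by name: the statement is the Claim_ definition above) =====
theorem count_hash_table_spec : Claim_equal_count_hash_table := by
  intro C hash_table _ hpre
  obtain ⟨-, hnd, hC⟩ := hpre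
  unfold Spec_count_hash_table
  simp only [count_hash_table, count_hash_table_alt]
  have hcont : ∀ k ∈ C, (C.foldl (fun d itemset => d.insert itemset (0 : Int))
      (PySem.Dict.empty : PySem.Dict (List Int) Int)).contains k = true := by
    intro k hk
    rw [PySem.Dict.contains_iff_mem_keys,
      PySem.Dict.keys_foldl_insert C (fun _ _ => (0 : Int)), PySem.Dict.keys_empty,
      PySem.Set.update_nil_left, PySem.Set.mem_ofList]
    exact hk
  rw [pv_items_foldl_selfmap C _ _ hcont, pv_items_foldl_empty C (fun _ => (0 : Int)),
    pv_items_foldl_empty C (pvBSupport ⟨hash_table⟩), List.map_map]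
  refine List.map_congr_left ?_
  intro k hk
  have hkC : k ∈ C := (PySem.Set.mem_ofList _ _).mp hk
  obtain ⟨hne, -⟩ := hC k hkC
  cases k with
  | nil => exact absurd rfl hne
  | cons i0 rest =>
    simp only [Function.comp_apply, if_pos hkC]
    exact congrArg (Prod.mk _) (pv_perItem hash_table hnd i0 rest)
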